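-- pv_equiv track=rewrite | github.com/Shmoogster/PIAA | lb3/Levenshtein.py | wagnerFischerDistance
-- ===== SOURCE A (Python) =====
-- def wagnerFischerDistance(string1: str, string2: str, replaceCost: int, insertCost: int, deleteCost: int, doubleDeleteCost: int) -> int:
--     """Ищет минимальное редакционное расстояние с учетом правила треугольника и операции удаления двух символов"""
--     n, m = len(string1), len(string2)
--
--     # Проверяем правило треугольника для весов операций
--     if replaceCost > deleteCost + insertCost:
--         replaceCost = deleteCost + insertCost
--
--     # Матрица динамического программирования
--     dp = [[0] * (m + 1) for _ in range(n + 1)]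
--
--     # Инициализация первой строки и столбца
--     for i in range(n + 1):
--         dp[i][0] = i * deleteCost
--     for j in range(m + 1):
--         dp[0][j] = j * insertCost
--
--     # Заполнение матрицы
--     for i in range(1, n + 1):
--         for j in range(1, m + 1):
--             operations = []
--
--             # Удаление одного символа из string1
--             operations.append(dp[i-1][j] + deleteCost)
--
--             # Вставка одного символа в string1
--             operations.append(dp[i][j-1] + insertCost)
--
--             # Замена или совпадение символов
--             if string1[i-1] == string2[j-1]:
--                 operations.append(dp[i-1][j-1])  # Совпадение
--             else:
--                 operations.append(dp[i-1][j-1] + replaceCost)  # Замена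
--
--             # Операция удаления двух последовательных символов (4-я операция)
--             if i >= 2 and string1[i-1] == string1[i-2]:
--                 operations.append(dp[i-2][j] + doubleDeleteCost)
--
--             dp[i][j] = min(operations)
--
--     return dp[n][m]
-- ===== SOURCE B (Python) =====
-- def _wfDeps(string1, string2, i, j, replaceCost, insertCost, deleteCost, doubleDeleteCost):
--     """Dependencies of cell (i, j) of the recurrence (i, j >= 1), as (cell, edge cost) pairs."""
--     deps = [((i - 1, j), deleteCost),
--             ((i, j - 1), insertCost),
--             ((i - 1, j - 1), 0 if string1[i - 1] == string2[j - 1] else replaceCost)]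
--     if i >= 2 and string1[i - 1] == string1[i - 2]:
--         deps.append(((i - 2, j), doubleDeleteCost))
--     return deps
--
--
-- def wagnerFischerDistance(string1: str, string2: str, replaceCost: int, insertCost: int, deleteCost: int, doubleDeleteCost: int) -> int:
--     """Top-down, demand-driven evaluation: memoized recursion on (i, j) run with an
--     explicit stack (iterative post-order DFS over the dependency DAG), instead of
--     A's bottom-up fill of a full matrix; only cells the result needs are computed."""
--     if replaceCost > deleteCost + insertCost:
--         replaceCost = deleteCost + insertCost
--     n, m = len(string1), len(string2)
--     memo = {}
--     stack = [(n, m, False)]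
--     while stack:
--         i, j, expand = stack.pop()
--         if (i, j) in memo:
--             continue
--         if expand:
--             memo[(i, j)] = min(memo[d] + c for d, c in
--                                _wfDeps(string1, string2, i, j, replaceCost, insertCost, deleteCost, doubleDeleteCost))
--         elif i == 0:
--             memo[(i, j)] = j * insertCost
--         elif j == 0:
--             memo[(i, j)] = i * deleteCost
--         else:
--             stack.append((i, j, True))
--             for d, _ in _wfDeps(string1, string2, i, j, replaceCost, insertCost, deleteCost, doubleDeleteCost):
--                 stack.append((d[0], d[1], False))
--     return memo[(n, m)]
-- ===== Notes on version B (the rewrite author's own statement) =====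
-- stated objective: alternative
-- what changed: B replaces A's bottom-up fill of the whole (n+1)x(m+1) matrix with top-down, demand-driven memoized evaluation: the recurrence is run as an iterative post-order DFS over the dependency DAG with an explicit stack and a dict memo, computing only the cells the final answer depends on.
import Mathlib
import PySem

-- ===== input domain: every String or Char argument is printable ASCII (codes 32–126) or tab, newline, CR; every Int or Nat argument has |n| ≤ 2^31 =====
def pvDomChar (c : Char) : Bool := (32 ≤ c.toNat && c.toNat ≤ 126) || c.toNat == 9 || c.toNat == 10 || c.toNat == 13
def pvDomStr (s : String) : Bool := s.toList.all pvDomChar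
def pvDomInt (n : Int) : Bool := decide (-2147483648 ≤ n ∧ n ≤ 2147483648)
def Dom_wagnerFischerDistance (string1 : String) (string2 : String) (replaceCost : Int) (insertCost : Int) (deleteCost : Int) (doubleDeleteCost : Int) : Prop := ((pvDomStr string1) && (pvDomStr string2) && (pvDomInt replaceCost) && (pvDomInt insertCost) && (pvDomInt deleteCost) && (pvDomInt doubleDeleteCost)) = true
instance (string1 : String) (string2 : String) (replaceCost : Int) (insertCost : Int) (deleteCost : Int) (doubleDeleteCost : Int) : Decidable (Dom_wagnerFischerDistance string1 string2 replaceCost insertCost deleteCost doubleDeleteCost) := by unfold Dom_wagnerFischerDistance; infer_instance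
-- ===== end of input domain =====

-- B evaluates the same recurrence top-down and demand-driven: an iterative post-order
-- DFS with an explicit stack and a dict memo, instead of A's bottom-up matrix fill;
-- equal return value proved for all inputs.

-- ===== PORT A =====
-- Python's dp[i][j] read and write on the list-of-lists matrix
def wfGet (dp : List (List Int)) (i j : Nat) : Int := (dp.getD i []).getD j 0
def wfSet (dp : List (List Int)) (i j : Nat) (v : Int) : List (List Int) :=
  dp.set i ((dp.getD i []).set j v)

def wagnerFischerDistance (string1 : String) (string2 : String) (replaceCost : Int) (insertCost : Int) (deleteCost : Int) (doubleDeleteCost : Int) : Int :=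
  let s1 := string1.toList
  let s2 := string2.toList
  let n := s1.length
  let m := s2.length
  -- if replaceCost > deleteCost + insertCost: replaceCost = deleteCost + insertCost
  let rep := if replaceCost > deleteCost + insertCost then deleteCost + insertCost else replaceCost
  -- dp = [[0]*(m+1) for _ in range(n+1)]
  let dp : List (List Int) := List.replicate (n+1) (List.replicate (m+1) 0)
  -- for i in range(n+1): dp[i][0] = i*deleteCost  (loop indices are nonnegative: range(k) = List.range k)
  let dp := (List.range (n+1)).foldl (fun dp i => wfSet dp i 0 ((i : Int) * deleteCost)) dp
  -- for j in range(m+1): dp[0][j] = j*insertCost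
  let dp := (List.range (m+1)).foldl (fun dp j => wfSet dp 0 j ((j : Int) * insertCost)) dp
  -- for i in range(1, n+1): for j in range(1, m+1): …  (i = k+1, j = l+1)
  let dp := (List.range n).foldl (fun dp k =>
    (List.range m).foldl (fun dp l =>
      let i := k + 1
      let j := l + 1
      let ops := [wfGet dp (i-1) j + deleteCost, wfGet dp i (j-1) + insertCost]
      let ops := ops ++ [if s1.getD (i-1) ' ' = s2.getD (j-1) ' ' then wfGet dp (i-1) (j-1)
                         else wfGet dp (i-1) (j-1) + rep]
      -- 'i >= 2 and string1[i-1] == string1[i-2]' (short-circuit: the index is only relevant when i ≥ 2)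
      let ops := if 2 ≤ i ∧ s1.getD (i-1) ' ' = s1.getD (i-2) ' '
                 then ops ++ [wfGet dp (i-2) j + doubleDeleteCost] else ops
      wfSet dp i j ((PySem.List.min? ops (fun y => y)).getD 0)) dp) dp
  wfGet dp n m

-- ===== PORT B =====
-- _wfDeps of Source B: the (cell, edge cost) dependencies of cell (i, j), i, j ≥ 1
def wfDeps (s1 s2 : List Char) (rep ins del dd : Int) (i j : Nat) : List ((Nat × Nat) × Int) :=
  let deps := [((i-1, j), del), ((i, j-1), ins),
               ((i-1, j-1), if s1.getD (i-1) ' ' = s2.getD (j-1) ' ' then 0 else rep)]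
  -- 'i >= 2 and string1[i-1] == string1[i-2]' (short-circuit as in A)
  if 2 ≤ i ∧ s1.getD (i-1) ' ' = s1.getD (i-2) ' ' then deps ++ [((i-2, j), dd)] else deps

-- termination measure for the while loop: Σ over stack entries of 5^(i+j+1) for
-- unexpanded entries, 1 for expand markers (an expansion replaces one unexpanded
-- entry by its marker plus ≤ 4 strictly lighter unexpanded entries)
def wfW : Nat × Nat × Bool → Nat
  | (i, j, false) => 5 ^ (i + j + 1)
  | (_, _, true) => 1
def wfM (st : List (Nat × Nat × Bool)) : Nat := (st.map wfW).sum

theorem wfW_pos (e : Nat × Nat × Bool) : 1 ≤ wfW e := by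
  obtain ⟨i, j, b⟩ := e
  cases b <;> simp [wfW] <;> exact Nat.one_le_pow _ _ (by norm_num)

theorem wfM_push (s1 s2 : List Char) (rep ins del dd : Int) (i j : Nat)
    (hi : ¬ i = 0) (hj : ¬ j = 0) (rest : List (Nat × Nat × Bool)) :
    wfM (((wfDeps s1 s2 rep ins del dd i j).map
        (fun dc => (dc.1.1, dc.1.2, false))).reverse ++ (i, j, true) :: rest)
      < wfM ((i, j, false) :: rest) := by
  have hp : (1:Nat) ≤ 5 ^ (i + j) := Nat.one_le_pow _ _ (by norm_num)
  have h2 : 5 ^ (i + j + 1) = 5 ^ (i + j) * 5 := pow_succ 5 (i + j)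
  have hA : 5 ^ (i - 1 + j + 1) ≤ 5 ^ (i + j) :=
    Nat.pow_le_pow_right (by norm_num) (by omega)
  have hB : 5 ^ (i + (j - 1) + 1) ≤ 5 ^ (i + j) :=
    Nat.pow_le_pow_right (by norm_num) (by omega)
  have hC : 5 ^ (i - 1 + (j - 1) + 1) ≤ 5 ^ (i + j) :=
    Nat.pow_le_pow_right (by norm_num) (by omega)
  have hD : 5 ^ (i - 2 + j + 1) ≤ 5 ^ (i + j) :=
    Nat.pow_le_pow_right (by norm_num) (by omega)
  simp only [wfM, wfDeps]
  split_ifs with hg <;>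
    simp only [List.map_append, List.map_cons, List.map_nil, List.reverse_append,
      List.reverse_cons, List.reverse_nil, List.nil_append, List.map, List.sum_cons,
      List.append_assoc, List.cons_append, List.sum_append, List.map_reverse,
      List.sum_reverse, wfW] <;>
    omega

-- the loop of Source B: state = (stack, memo); memo[dep] reads use getD 0 (exact: the
-- invariant below shows every dependency is memoized when an expand marker is popped,
-- so Python's memo[d] never raises)
def wfLoop (s1 s2 : List Char) (rep ins del dd : Int) :
    List (Nat × Nat × Bool) → PySem.Dict (Nat × Nat) Int → PySem.Dict (Nat × Nat) Int
  | [], memo => memo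
  | (i, j, expand) :: rest, memo =>
    if memo.contains (i, j) then wfLoop s1 s2 rep ins del dd rest memo
    else if expand then
      wfLoop s1 s2 rep ins del dd rest (memo.insert (i, j)
        ((PySem.List.min? ((wfDeps s1 s2 rep ins del dd i j).map
          (fun dc => memo.getD dc.1 0 + dc.2)) (fun y => y)).getD 0))
    else if hi : i = 0 then wfLoop s1 s2 rep ins del dd rest (memo.insert (i, j) ((j : Int) * ins))
    else if hj : j = 0 then wfLoop s1 s2 rep ins del dd rest (memo.insert (i, j) ((i : Int) * del))
    else wfLoop s1 s2 rep ins del dd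
      (((wfDeps s1 s2 rep ins del dd i j).map (fun dc => (dc.1.1, dc.1.2, false))).reverse
        ++ (i, j, true) :: rest) memo
  termination_by st _ => wfM st
  decreasing_by
  · simp only [wfM, List.map, List.sum_cons]; have := wfW_pos (i, j, expand); omega
  · simp only [wfM, List.map, List.sum_cons]; have := wfW_pos (i, j, expand); omega
  · simp only [wfM, List.map, List.sum_cons]; have := wfW_pos (i, j, expand); omega
  · simp only [wfM, List.map, List.sum_cons]; have := wfW_pos (i, j, expand); omega
  · cases expand with
    | false => exact wfM_push s1 s2 rep ins del dd i j hi hj rest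
    | true => simp_all

def wagnerFischerDistance_alt (string1 : String) (string2 : String) (replaceCost : Int) (insertCost : Int) (deleteCost : Int) (doubleDeleteCost : Int) : Int :=
  let s1 := string1.toList
  let s2 := string2.toList
  let rep := if replaceCost > deleteCost + insertCost then deleteCost + insertCost else replaceCost
  let n := s1.length
  let m := s2.length
  let memo := wfLoop s1 s2 rep insertCost deleteCost doubleDeleteCost
    [(n, m, false)] PySem.Dict.empty
  -- return memo[(n, m)] (always present: (n, m) was on the stack)
  memo.getD (n, m) 0

-- ===== PRECONDITION & SPEC =====
def Spec_wagnerFischerDistance (string1 : String) (string2 : String) (replaceCost : Int) (insertCost : Int) (deleteCost : Int) (doubleDeleteCost : Int) (out : Int) : Prop := out = wagnerFischerDistance_alt string1 string2 replaceCost insertCost deleteCost doubleDeleteCost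
instance (string1 : String) (string2 : String) (replaceCost : Int) (insertCost : Int) (deleteCost : Int) (doubleDeleteCost : Int) (out : Int) : Decidable (Spec_wagnerFischerDistance string1 string2 replaceCost insertCost deleteCost doubleDeleteCost out) := by unfold Spec_wagnerFischerDistance; infer_instance

-- ===== CLAIM (what is proved, stated in full; the proofs are below) =====
def Claim_equal_wagnerFischerDistance : Prop := ∀ (string1 : String) (string2 : String) (replaceCost : Int) (insertCost : Int) (deleteCost : Int) (doubleDeleteCost : Int), Dom_wagnerFischerDistance string1 string2 replaceCost insertCost deleteCost doubleDeleteCost → Spec_wagnerFischerDistance string1 string2 replaceCost insertCost deleteCost doubleDeleteCost (wagnerFischerDistance string1 string2 replaceCost insertCost deleteCost doubleDeleteCost)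

-- ===== LEMMAS AND PROOFS =====

-- the common mathematical recurrence both programs tabulate (rep = the clamped replace cost)
def wfF (s1 s2 : List Char) (rep ins del dd : Int) : Nat → Nat → Int
  | 0, j => (j : Int) * ins
  | i+1, 0 => ((i : Int) + 1) * del
  | i+1, j+1 =>
    let x := wfF s1 s2 rep ins del dd i (j+1) + del
    let y := wfF s1 s2 rep ins del dd (i+1) j + ins
    let z := if s1.getD i ' ' = s2.getD j ' ' then wfF s1 s2 rep ins del dd i j
             else wfF s1 s2 rep ins del dd i j + rep
    let base := min (min x y) z
    if 1 ≤ i ∧ s1.getD i ' ' = s1.getD (i-1) ' ' then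
      min base (wfF s1 s2 rep ins del dd (i-1) (j+1) + dd)
    else base
  termination_by i j => (i, j)

theorem wfMin3 (a b c : Int) : (PySem.List.min? [a,b,c] (fun y => y)).getD 0 = min (min a b) c := by
  rw [PySem.List.min?_id_cons]
  simp only [List.foldl, Option.getD_some, min_def]

theorem wfMin4 (a b c d : Int) :
    (PySem.List.min? [a,b,c,d] (fun y => y)).getD 0 = min (min (min a b) c) d := by
  rw [PySem.List.min?_id_cons]
  simp only [List.foldl, Option.getD_some, min_def]

theorem foldl_range_inv {α : Type} (g : α → Nat → α) (P : Nat → α → Prop) :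
    ∀ (n : Nat) (a : α), P 0 a → (∀ k x, k < n → P k x → P (k+1) (g x k)) →
      P n ((List.range n).foldl g a) := by
  intro n
  induction n with
  | zero => intro a h0 _; simpa using h0
  | succ n ih =>
    intro a h0 hs
    rw [List.range_succ, List.foldl_append]
    exact hs n _ (Nat.lt_succ_self n) (ih a h0 (fun k x hk => hs k x (Nat.lt_succ_of_lt hk)))

def wfShape (dp : List (List Int)) (n m : Nat) : Prop :=
  dp.length = n+1 ∧ ∀ i, i ≤ n → (dp.getD i []).length = m+1
def wfInv (s1 s2 : List Char) (rep iC dC ddC : Int) (I J : Nat) (dp : List (List Int)) : Prop :=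
  wfShape dp s1.length s2.length ∧
  ∀ i j, i ≤ s1.length → j ≤ s2.length →
    (i < I ∨ j = 0 ∨ (i = I ∧ j ≤ J)) → wfGet dp i j = wfF s1 s2 rep iC dC ddC i j

theorem wfShape_set (dp : List (List Int)) (n m i j : Nat) (v : Int) (h : wfShape dp n m) :
    wfShape (wfSet dp i j v) n m := by
  obtain ⟨h1, h2⟩ := h
  refine ⟨by simp [wfSet, h1], fun i' hi' => ?_⟩
  by_cases he : i' = i
  · subst he
    by_cases hlt : i' < dp.length
    · simp [wfSet, List.getD_eq_getElem?_getD, List.getElem?_set_self hlt]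
      simpa [List.getD_eq_getElem?_getD] using h2 i' hi'
    · rw [wfSet, List.set_eq_of_length_le (Nat.le_of_not_lt hlt)]
      exact h2 i' hi'
  · rw [wfSet]
    rw [show (dp.set i ((dp.getD i []).set j v)).getD i' [] = dp.getD i' [] from by
      simp [List.getD_eq_getElem?_getD, List.getElem?_set_ne (Ne.symm he)]]
    exact h2 i' hi'

theorem wfGet_set_self (dp : List (List Int)) (i j : Nat) (v : Int)
    (hi : i < dp.length) (hj : j < (dp.getD i []).length) :
    wfGet (wfSet dp i j v) i j = v := by
  rw [List.getD_eq_getElem?_getD] at hj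
  simp [wfGet, wfSet, List.getD_eq_getElem?_getD, List.getElem?_set_self hi,
    List.getElem?_set_self hj]

theorem wfGet_set_ne (dp : List (List Int)) (i j i' j' : Nat) (v : Int)
    (h : i' ≠ i ∨ j' ≠ j) :
    wfGet (wfSet dp i j v) i' j' = wfGet dp i' j' := by
  rcases h with h | h
  · simp [wfGet, wfSet, List.getD_eq_getElem?_getD, List.getElem?_set_ne (Ne.symm h)]
  · by_cases he : i' = i
    · subst he
      by_cases hlt : i' < dp.length
      · simp [wfGet, wfSet, List.getD_eq_getElem?_getD, List.getElem?_set_self hlt,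
          List.getElem?_set_ne (Ne.symm h)]
      · rw [wfSet, List.set_eq_of_length_le (Nat.le_of_not_lt hlt)]
    · simp [wfGet, wfSet, List.getD_eq_getElem?_getD, List.getElem?_set_ne (Ne.symm he)]

-- after the two initialisation loops the border rows hold i*del / j*ins
theorem wfInit (s1 s2 : List Char) (rep iC dC ddC : Int) :
    wfInv s1 s2 rep iC dC ddC 0 s2.length
      ((List.range (s2.length+1)).foldl (fun dp j => wfSet dp 0 j ((j : Int) * iC))
        ((List.range (s1.length+1)).foldl (fun dp i => wfSet dp i 0 ((i : Int) * dC))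
          (List.replicate (s1.length+1) (List.replicate (s2.length+1) 0)))) := by
  set n := s1.length
  set m := s2.length
  -- phase 1
  have P1 := foldl_range_inv (fun dp i => wfSet dp i 0 ((i : Int) * dC))
    (fun k dp => wfShape dp n m ∧
      ∀ i j, i ≤ n → j ≤ m → wfGet dp i j = if i < k ∧ j = 0 then (i:Int) * dC else 0)
    (n+1) (List.replicate (n+1) (List.replicate (m+1) 0))
    (by
      refine ⟨⟨by simp, fun i hi => ?_⟩, fun i j hi hj => ?_⟩
      · simp [List.getD_eq_getElem?_getD, List.getElem?_replicate, Nat.lt_succ_of_le hi]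
      · simp [wfGet, List.getD_eq_getElem?_getD, List.getElem?_replicate,
          Nat.lt_succ_of_le hi, Nat.lt_succ_of_le hj])
    (by
      rintro k dp hk ⟨hsh, hval⟩
      refine ⟨wfShape_set _ _ _ _ _ _ hsh, fun i j hi hj => ?_⟩
      by_cases he : i = k ∧ j = 0
      · obtain ⟨he1, he2⟩ := he; subst he1; subst he2
        rw [wfGet_set_self _ _ _ _ (by rw [hsh.1]; omega) (by rw [hsh.2 i hi]; omega)]
        simp [Nat.lt_succ_self]
      · rw [wfGet_set_ne _ _ _ _ _ _ (by omega), hval i j hi hj]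
        by_cases h2 : i < k ∧ j = 0 <;> simp [h2] <;> omega)
  obtain ⟨hsh1, hval1⟩ := P1
  -- phase 2
  have P2 := foldl_range_inv (fun dp j => wfSet dp 0 j ((j : Int) * iC))
    (fun k dp => wfShape dp n m ∧
      ∀ i j, i ≤ n → j ≤ m → wfGet dp i j =
        if i = 0 ∧ j < k then (j:Int) * iC else if j = 0 then (i:Int) * dC else 0)
    (m+1) _
    (⟨hsh1, fun i j hi hj => by
      rw [hval1 i j hi hj]
      by_cases h2 : j = 0 <;> simp [h2] <;> omega⟩)
    (by
      rintro k dp hk ⟨hsh, hval⟩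
      refine ⟨wfShape_set _ _ _ _ _ _ hsh, fun i j hi hj => ?_⟩
      by_cases he : i = 0 ∧ j = k
      · obtain ⟨he1, he2⟩ := he; subst he1; subst he2
        rw [wfGet_set_self _ _ _ _ (by rw [hsh.1]; omega) (by rw [hsh.2 0 (by omega)]; omega)]
        simp [Nat.lt_succ_self]
      · rw [wfGet_set_ne _ _ _ _ _ _ (by omega), hval i j hi hj]
        by_cases h2 : i = 0 ∧ j < k
        · simp [h2]; omega
        · by_cases h3 : i = 0 ∧ j < k + 1 <;> by_cases h4 : j = 0 <;>
            simp [h2, h3, h4] <;> omega)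
  obtain ⟨hsh2, hval2⟩ := P2
  refine ⟨hsh2, fun i j hi hj hc => ?_⟩
  rw [hval2 i j hi hj]
  rcases hc with hc | hc | hc
  · omega
  · subst hc
    rcases Nat.eq_zero_or_pos i with h0 | h0
    · subst h0; simp [wfF]
    · obtain ⟨i', rfl⟩ : ∃ i', i = i' + 1 := ⟨i - 1, by omega⟩
      rw [if_neg (by omega), if_pos rfl]
      show ((i' + 1 : Nat) : Int) * dC = wfF s1 s2 rep iC dC ddC (i'+1) 0
      simp [wfF]
  · obtain ⟨rfl, hle⟩ := hc
    rw [if_pos ⟨rfl, by omega⟩]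
    simp [wfF]

theorem wfInv_advance (s1 s2 : List Char) (rep iC dC ddC : Int) (k : Nat) (dp : List (List Int))
    (h : wfInv s1 s2 rep iC dC ddC k s2.length dp) : wfInv s1 s2 rep iC dC ddC (k+1) 0 dp := by
  refine ⟨h.1, fun i j hi hj hc => h.2 i j hi hj ?_⟩
  by_cases h1 : i < k
  · exact Or.inl h1
  · by_cases h2 : j = 0
    · exact Or.inr (Or.inl h2)
    · exact Or.inr (Or.inr ⟨by omega, by omega⟩)

theorem wfVal (s1 s2 : List Char) (rep iC dC ddC : Int) (k l : Nat) (dp : List (List Int))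
    (hk : k < s1.length) (hl : l < s2.length)
    (h : wfInv s1 s2 rep iC dC ddC (k+1) l dp) :
    ((PySem.List.min?
        (if 2 ≤ k + 1 ∧ s1.getD (k + 1 - 1) ' ' = s1.getD (k + 1 - 2) ' ' then
          [wfGet dp (k + 1 - 1) (l + 1) + dC, wfGet dp (k + 1) (l + 1 - 1) + iC] ++
              [if s1.getD (k + 1 - 1) ' ' = s2.getD (l + 1 - 1) ' ' then
                  wfGet dp (k + 1 - 1) (l + 1 - 1)
                else wfGet dp (k + 1 - 1) (l + 1 - 1) + rep] ++
            [wfGet dp (k + 1 - 2) (l + 1) + ddC]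
        else
          [wfGet dp (k + 1 - 1) (l + 1) + dC, wfGet dp (k + 1) (l + 1 - 1) + iC] ++
            [if s1.getD (k + 1 - 1) ' ' = s2.getD (l + 1 - 1) ' ' then
                wfGet dp (k + 1 - 1) (l + 1 - 1)
              else wfGet dp (k + 1 - 1) (l + 1 - 1) + rep])
        fun y => y).getD 0) = wfF s1 s2 rep iC dC ddC (k+1) (l+1) := by
  have h21 : k + 1 - 2 = k - 1 := rfl
  have hr1 : wfGet dp k (l+1) = wfF s1 s2 rep iC dC ddC k (l+1) :=
    h.2 k (l+1) (by omega) (by omega) (Or.inl (by omega))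
  have hr2 : wfGet dp (k+1) l = wfF s1 s2 rep iC dC ddC (k+1) l :=
    h.2 (k+1) l (by omega) (by omega) (Or.inr (Or.inr ⟨rfl, le_rfl⟩))
  have hr3 : wfGet dp k l = wfF s1 s2 rep iC dC ddC k l :=
    h.2 k l (by omega) (by omega) (Or.inl (by omega))
  have hr4 : wfGet dp (k-1) (l+1) = wfF s1 s2 rep iC dC ddC (k-1) (l+1) :=
    h.2 (k-1) (l+1) (by omega) (by omega) (Or.inl (by omega))
  simp only [Nat.add_sub_cancel, h21, List.cons_append, List.nil_append]
  by_cases hg : 2 ≤ k + 1 ∧ s1.getD k ' ' = s1.getD (k - 1) ' '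
  · rw [if_pos hg, wfMin4, hr1, hr2, hr3, hr4]
    simp only [wfF]
    rw [if_pos (show 1 ≤ k ∧ s1.getD k ' ' = s1.getD (k-1) ' ' from ⟨by omega, hg.2⟩)]
  · rw [if_neg hg, wfMin3, hr1, hr2, hr3]
    simp only [wfF]
    rw [if_neg (show ¬(1 ≤ k ∧ s1.getD k ' ' = s1.getD (k-1) ' ') from fun hc => hg ⟨by omega, hc.2⟩)]

theorem wfA_eq (string1 string2 : String) (rC iC dC ddC : Int) :
    wagnerFischerDistance string1 string2 rC iC dC ddC =
      wfF string1.toList string2.toList (if rC > dC + iC then dC + iC else rC) iC dC ddC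
        string1.toList.length string2.toList.length := by
  simp only [wagnerFischerDistance]
  generalize string1.toList = s1
  generalize string2.toList = s2
  generalize (if rC > dC + iC then dC + iC else rC) = rep
  have hmain := foldl_range_inv
    (fun dp k =>
      (List.range s2.length).foldl (fun dp l =>
        wfSet dp (k + 1) (l + 1)
          ((PySem.List.min?
              (if 2 ≤ k + 1 ∧ s1.getD (k + 1 - 1) ' ' = s1.getD (k + 1 - 2) ' ' then
                [wfGet dp (k + 1 - 1) (l + 1) + dC, wfGet dp (k + 1) (l + 1 - 1) + iC] ++
                    [if s1.getD (k + 1 - 1) ' ' = s2.getD (l + 1 - 1) ' ' then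
                        wfGet dp (k + 1 - 1) (l + 1 - 1)
                      else wfGet dp (k + 1 - 1) (l + 1 - 1) + rep] ++
                  [wfGet dp (k + 1 - 2) (l + 1) + ddC]
              else
                [wfGet dp (k + 1 - 1) (l + 1) + dC, wfGet dp (k + 1) (l + 1 - 1) + iC] ++
                  [if s1.getD (k + 1 - 1) ' ' = s2.getD (l + 1 - 1) ' ' then
                      wfGet dp (k + 1 - 1) (l + 1 - 1)
                    else wfGet dp (k + 1 - 1) (l + 1 - 1) + rep])
              fun y => y).getD 0)) dp)
    (fun k dp => wfInv s1 s2 rep iC dC ddC k s2.length dp)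
    s1.length _ (wfInit s1 s2 rep iC dC ddC)
    (by
      intro k dp hk hInv
      have hinner := foldl_range_inv
        (fun dp l =>
          wfSet dp (k + 1) (l + 1)
            ((PySem.List.min?
                (if 2 ≤ k + 1 ∧ s1.getD (k + 1 - 1) ' ' = s1.getD (k + 1 - 2) ' ' then
                  [wfGet dp (k + 1 - 1) (l + 1) + dC, wfGet dp (k + 1) (l + 1 - 1) + iC] ++
                      [if s1.getD (k + 1 - 1) ' ' = s2.getD (l + 1 - 1) ' ' then
                          wfGet dp (k + 1 - 1) (l + 1 - 1)
                        else wfGet dp (k + 1 - 1) (l + 1 - 1) + rep] ++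
                    [wfGet dp (k + 1 - 2) (l + 1) + ddC]
                else
                  [wfGet dp (k + 1 - 1) (l + 1) + dC, wfGet dp (k + 1) (l + 1 - 1) + iC] ++
                    [if s1.getD (k + 1 - 1) ' ' = s2.getD (l + 1 - 1) ' ' then
                        wfGet dp (k + 1 - 1) (l + 1 - 1)
                      else wfGet dp (k + 1 - 1) (l + 1 - 1) + rep])
                fun y => y).getD 0))
        (fun l dp => wfInv s1 s2 rep iC dC ddC (k+1) l dp)
        s2.length dp (wfInv_advance s1 s2 rep iC dC ddC k dp hInv)
        (by
          intro l dp hl hInv2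
          have hV := wfVal s1 s2 rep iC dC ddC k l dp hk hl hInv2
          obtain ⟨⟨hlen, hrow⟩, hval⟩ := hInv2
          beta_reduce
          rw [hV]
          refine ⟨wfShape_set _ _ _ _ _ _ ⟨hlen, hrow⟩, fun i j hi hj hc => ?_⟩
          by_cases he : i = k + 1 ∧ j = l + 1
          · obtain ⟨rfl, rfl⟩ := he
            rw [wfGet_set_self _ _ _ _ (by rw [hlen]; omega) (by rw [hrow _ hi]; omega)]
          · rw [wfGet_set_ne _ _ _ _ _ _ (by omega)]
            refine hval i j hi hj ?_
            rcases hc with h1 | h1 | ⟨h1, h2⟩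
            · exact Or.inl h1
            · exact Or.inr (Or.inl h1)
            · exact Or.inr (Or.inr ⟨h1, by omega⟩))
      exact hinner)
  exact hmain.2 s1.length s2.length le_rfl le_rfl (Or.inr (Or.inr ⟨rfl, le_rfl⟩))

-- ===== B-side lemmas =====

-- memo correctness: every memoized value is the recurrence value
def wfMemOK (s1 s2 : List Char) (rep ins del dd : Int)
    (memo : PySem.Dict (Nat × Nat) Int) : Prop :=
  ∀ i j v, memo.get? (i, j) = some v → v = wfF s1 s2 rep ins del dd i j

-- stack discipline: the dependencies of every expand marker are memoized or appear
-- (as keys) above it on the stack / in 'extra'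
def wfStackOK (s1 s2 : List Char) (rep ins del dd : Int)
    (memo : PySem.Dict (Nat × Nat) Int) :
    List (Nat × Nat) → List (Nat × Nat × Bool) → Prop
  | _, [] => True
  | extra, (i, j, b) :: rest =>
    (b = true → (1 ≤ i ∧ 1 ≤ j) ∧
      ∀ dc ∈ wfDeps s1 s2 rep ins del dd i j,
        (memo.get? dc.1).isSome = true ∨ dc.1 ∈ extra) ∧
    wfStackOK s1 s2 rep ins del dd memo ((i, j) :: extra) rest

theorem wfStackOK_mono (s1 s2 : List Char) (rep ins del dd : Int)
    (memo : PySem.Dict (Nat × Nat) Int) :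
    ∀ (st : List (Nat × Nat × Bool)) (E E' : List (Nat × Nat)),
      (∀ p, p ∈ E → p ∈ E') →
      wfStackOK s1 s2 rep ins del dd memo E st →
      wfStackOK s1 s2 rep ins del dd memo E' st := by
  intro st
  induction st with
  | nil => intro E E' _ _; trivial
  | cons e rest ih =>
    obtain ⟨i, j, b⟩ := e
    intro E E' hsub h
    simp only [wfStackOK] at h ⊢
    obtain ⟨h1, h2⟩ := h
    refine ⟨fun hb => ⟨(h1 hb).1, fun dc hdc => ?_⟩, ih _ _ ?_ h2⟩
    · rcases (h1 hb).2 dc hdc with h | h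
      · exact Or.inl h
      · exact Or.inr (hsub _ h)
    · intro p hp
      rcases List.mem_cons.mp hp with hp | hp
      · exact hp ▸ List.mem_cons_self
      · exact List.mem_cons_of_mem _ (hsub _ hp)

-- a key known to be memoized can be dropped from 'extra'
theorem wfStackOK_absorb (s1 s2 : List Char) (rep ins del dd : Int)
    (memo : PySem.Dict (Nat × Nat) Int) (p : Nat × Nat)
    (hp : (memo.get? p).isSome = true) :
    ∀ (st : List (Nat × Nat × Bool)) (E : List (Nat × Nat)),
      wfStackOK s1 s2 rep ins del dd memo (p :: E) st →
      wfStackOK s1 s2 rep ins del dd memo E st := by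
  intro st
  induction st with
  | nil => intro E _; trivial
  | cons e rest ih =>
    obtain ⟨i, j, b⟩ := e
    intro E h
    simp only [wfStackOK] at h ⊢
    obtain ⟨h1, h2⟩ := h
    refine ⟨fun hb => ⟨(h1 hb).1, fun dc hdc => ?_⟩, ?_⟩
    · rcases (h1 hb).2 dc hdc with h | h
      · exact Or.inl h
      · rcases List.mem_cons.mp h with h | h
        · exact Or.inl (h ▸ hp)
        · exact Or.inr h
    · refine ih _ (wfStackOK_mono s1 s2 rep ins del dd memo rest _ _ ?_ h2)
      intro q hq
      rcases List.mem_cons.mp hq with hq | hq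
      · exact List.mem_cons_of_mem _ (hq ▸ List.mem_cons_self)
      · rcases List.mem_cons.mp hq with hq | hq
        · exact hq ▸ List.mem_cons_self
        · exact List.mem_cons_of_mem _ (List.mem_cons_of_mem _ hq)

-- inserting the key at the head of 'extra' into the memo
theorem wfStackOK_insert (s1 s2 : List Char) (rep ins del dd : Int)
    (memo : PySem.Dict (Nat × Nat) Int) (p : Nat × Nat) (v : Int) :
    ∀ (st : List (Nat × Nat × Bool)) (E : List (Nat × Nat)),
      wfStackOK s1 s2 rep ins del dd memo (p :: E) st →
      wfStackOK s1 s2 rep ins del dd (memo.insert p v) E st := by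
  intro st
  induction st with
  | nil => intro E _; trivial
  | cons e rest ih =>
    obtain ⟨i, j, b⟩ := e
    intro E h
    simp only [wfStackOK] at h ⊢
    obtain ⟨h1, h2⟩ := h
    refine ⟨fun hb => ⟨(h1 hb).1, fun dc hdc => ?_⟩, ?_⟩
    · rcases (h1 hb).2 dc hdc with h | h
      · left
        rw [PySem.Dict.get?_insert]
        split_ifs with he
        · rfl
        · exact h
      · rcases List.mem_cons.mp h with h | h
        · left
          rw [PySem.Dict.get?_insert, if_pos h]
          rfl
        · exact Or.inr h
    · refine ih _ (wfStackOK_mono s1 s2 rep ins del dd memo rest _ _ ?_ h2)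
      intro q hq
      rcases List.mem_cons.mp hq with hq | hq
      · exact List.mem_cons_of_mem _ (hq ▸ List.mem_cons_self)
      · rcases List.mem_cons.mp hq with hq | hq
        · exact hq ▸ List.mem_cons_self
        · exact List.mem_cons_of_mem _ (List.mem_cons_of_mem _ hq)

-- pushing a block of unexpanded entries: only their keys are added to 'extra'
theorem wfStackOK_append_false (s1 s2 : List Char) (rep ins del dd : Int)
    (memo : PySem.Dict (Nat × Nat) Int) :
    ∀ (L : List (Nat × Nat × Bool)) (E : List (Nat × Nat)) (tail : List (Nat × Nat × Bool)),
      (∀ e ∈ L, e.2.2 = false) →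
      wfStackOK s1 s2 rep ins del dd memo (L.map (fun e => (e.1, e.2.1)) ++ E) tail →
      wfStackOK s1 s2 rep ins del dd memo E (L ++ tail) := by
  intro L
  induction L with
  | nil => intro E tail _ h; simpa using h
  | cons e L' ih =>
    obtain ⟨i, j, b⟩ := e
    intro E tail hf h
    have hb : b = false := hf (i, j, b) List.mem_cons_self
    subst hb
    simp only [List.cons_append, wfStackOK]
    refine ⟨fun hbb => by simp at hbb, ?_⟩
    refine ih _ _ (fun e he => hf e (List.mem_cons_of_mem _ he)) ?_
    refine wfStackOK_mono s1 s2 rep ins del dd memo tail _ _ ?_ h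
    intro q hq
    simp only [List.map_cons, List.cons_append] at hq
    rcases List.mem_cons.mp hq with hq | hq
    · exact List.mem_append_right _ (hq ▸ List.mem_cons_self)
    · rcases List.mem_append.mp hq with hq | hq
      · exact List.mem_append_left _ hq
      · exact List.mem_append_right _ (List.mem_cons_of_mem _ hq)

-- the computed value at an expand pop is the recurrence value
theorem wfExpandVal (s1 s2 : List Char) (rep ins del dd : Int)
    (memo : PySem.Dict (Nat × Nat) Int) (i j : Nat)
    (hi : 1 ≤ i) (hj : 1 ≤ j)
    (hdeps : ∀ dc ∈ wfDeps s1 s2 rep ins del dd i j,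
      memo.getD dc.1 0 = wfF s1 s2 rep ins del dd dc.1.1 dc.1.2) :
    ((PySem.List.min? ((wfDeps s1 s2 rep ins del dd i j).map
      (fun dc => memo.getD dc.1 0 + dc.2)) (fun y => y)).getD 0)
      = wfF s1 s2 rep ins del dd i j := by
  obtain ⟨i', rfl⟩ : ∃ i', i = i' + 1 := ⟨i - 1, by omega⟩
  obtain ⟨j', rfl⟩ : ∃ j', j = j' + 1 := ⟨j - 1, by omega⟩
  have e1 := hdeps ((i', j'+1), del) (by simp [wfDeps]; split_ifs <;> simp)
  have e2 := hdeps ((i'+1, j'), ins) (by simp [wfDeps]; split_ifs <;> simp)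
  have e3 := hdeps ((i', j'), if s1.getD i' ' ' = s2.getD j' ' ' then 0 else rep)
    (by simp [wfDeps]; split_ifs <;> simp)
  simp only [Nat.add_sub_cancel] at e1 e2 e3
  rw [show wfF s1 s2 rep ins del dd (i'+1) (j'+1) =
    (let x := wfF s1 s2 rep ins del dd i' (j'+1) + del
     let y := wfF s1 s2 rep ins del dd (i'+1) j' + ins
     let z := if s1.getD i' ' ' = s2.getD j' ' ' then wfF s1 s2 rep ins del dd i' j'
              else wfF s1 s2 rep ins del dd i' j' + rep
     let base := min (min x y) z
     if 1 ≤ i' ∧ s1.getD i' ' ' = s1.getD (i'-1) ' ' then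
       min base (wfF s1 s2 rep ins del dd (i'-1) (j'+1) + dd)
     else base) from by simp [wfF]]
  simp only [wfDeps, Nat.add_sub_cancel]
  have hg2 : (2 ≤ i' + 1 ∧ s1.getD i' ' ' = s1.getD (i'+1-2) ' ')
      ↔ (1 ≤ i' ∧ s1.getD i' ' ' = s1.getD (i'-1) ' ') := by
    constructor
    · rintro ⟨h1, h2⟩; exact ⟨by omega, by simpa using h2⟩
    · rintro ⟨h1, h2⟩; exact ⟨by omega, by simpa using h2⟩
  by_cases hg : 1 ≤ i' ∧ s1.getD i' ' ' = s1.getD (i'-1) ' '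
  · have e4 := hdeps ((i'+1-2, j'+1), dd)
      (by
        simp only [wfDeps, Nat.add_sub_cancel]
        rw [if_pos (hg2.mpr hg)]
        simp)
    rw [if_pos (hg2.mpr hg), if_pos hg]
    simp only [List.map_append, List.map_cons, List.map_nil, List.cons_append, List.nil_append]
    rw [wfMin4, e1, e2, e3, e4]
    have : i' + 1 - 2 = i' - 1 := rfl
    rw [this]
    by_cases hc : s1.getD i' ' ' = s2.getD j' ' ' <;>
      · simp only [List.getD_eq_getElem?_getD] at hc
        simp [hc]
  · rw [if_neg (fun h => hg (hg2.mp h)), if_neg hg]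
    simp only [List.map_cons, List.map_nil]
    rw [wfMin3, e1, e2, e3]
    by_cases hc : s1.getD i' ' ' = s2.getD j' ' ' <;>
      · simp only [List.getD_eq_getElem?_getD] at hc
        simp [hc]

-- main loop invariant: the loop preserves memo correctness, memoizes every stack key,
-- and never removes memo entries
theorem wfLoop_sound (s1 s2 : List Char) (rep ins del dd : Int) :
    ∀ (N : Nat) (st : List (Nat × Nat × Bool)) (memo : PySem.Dict (Nat × Nat) Int),
      wfM st ≤ N →
      wfMemOK s1 s2 rep ins del dd memo →
      wfStackOK s1 s2 rep ins del dd memo [] st →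
      wfMemOK s1 s2 rep ins del dd (wfLoop s1 s2 rep ins del dd st memo) ∧
      (∀ e ∈ st, (((wfLoop s1 s2 rep ins del dd st memo).get? (e.1, e.2.1)).isSome) = true) ∧
      (∀ p, ((memo.get? p).isSome = true) →
        (((wfLoop s1 s2 rep ins del dd st memo).get? p).isSome) = true) := by
  intro N
  induction N with
  | zero =>
    intro st memo hM _ _
    cases st with
    | nil => exact ⟨by rwa [wfLoop], by simp, fun p hp => by rw [wfLoop]; exact hp⟩
    | cons e rest =>
      exfalso
      have := wfW_pos e
      simp only [wfM, List.map, List.sum_cons] at hM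
      omega
  | succ N ih =>
    intro st memo hM hMem hStack
    cases st with
    | nil => exact ⟨by rwa [wfLoop], by simp, fun p hp => by rw [wfLoop]; exact hp⟩
    | cons e rest =>
      obtain ⟨i, j, b⟩ := e
      have hWpos := wfW_pos (i, j, b)
      have hMrest : wfM rest ≤ N := by
        simp only [wfM, List.map, List.sum_cons] at hM ⊢; omega
      rw [wfLoop]
      by_cases hc : memo.contains (i, j)
      · rw [if_pos hc]
        have hcs : (memo.get? (i, j)).isSome = true := by
          rw [← PySem.Dict.contains_eq_isSome_get?]; exact hc
        have hSt : wfStackOK s1 s2 rep ins del dd memo [] rest :=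
          wfStackOK_absorb s1 s2 rep ins del dd memo (i, j) hcs rest [] hStack.2
        obtain ⟨r1, r2, r3⟩ := ih rest memo hMrest hMem hSt
        exact ⟨r1, fun e he => by
          rcases List.mem_cons.mp he with he | he
          · subst he; exact r3 _ hcs
          · exact r2 e he, r3⟩
      · rw [if_neg hc]
        have hMemIns : ∀ v, v = wfF s1 s2 rep ins del dd i j →
            wfMemOK s1 s2 rep ins del dd (memo.insert (i, j) v) := by
          intro v hv a bb w hw
          rw [PySem.Dict.get?_insert] at hw
          split_ifs at hw with he
          · cases hw
            obtain ⟨he1, he2⟩ := Prod.mk.injEq .. ▸ he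
            subst he1; subst he2; exact hv
          · exact hMem a bb w hw
        have hSelf : ∀ v, ((memo.insert (i, j) v).get? (i, j)).isSome = true := by
          intro v; rw [PySem.Dict.get?_insert_self]; rfl
        have hPers : ∀ (v : Int) p, (memo.get? p).isSome = true →
            ((memo.insert (i, j) v).get? p).isSome = true := by
          intro v p hp
          rw [PySem.Dict.get?_insert]
          split_ifs with he
          · rfl
          · exact hp
        have hAfterIns : ∀ v, v = wfF s1 s2 rep ins del dd i j →
            wfMemOK s1 s2 rep ins del dd (wfLoop s1 s2 rep ins del dd rest (memo.insert (i, j) v)) ∧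
            (∀ e ∈ ((i, j, b) :: rest),
              ((wfLoop s1 s2 rep ins del dd rest (memo.insert (i, j) v)).get? (e.1, e.2.1)).isSome = true) ∧
            (∀ p, (memo.get? p).isSome = true →
              ((wfLoop s1 s2 rep ins del dd rest (memo.insert (i, j) v)).get? p).isSome = true) := by
          intro v hv
          have hSt : wfStackOK s1 s2 rep ins del dd (memo.insert (i, j) v) [] rest :=
            wfStackOK_insert s1 s2 rep ins del dd memo (i, j) v rest [] hStack.2
          obtain ⟨r1, r2, r3⟩ := ih rest (memo.insert (i, j) v) hMrest (hMemIns v hv) hSt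
          refine ⟨r1, fun e he => ?_, fun p hp => r3 _ (hPers v p hp)⟩
          rcases List.mem_cons.mp he with he | he
          · subst he; exact r3 _ (hSelf v)
          · exact r2 e he
        by_cases hb : b = true
        · subst hb
          rw [if_pos rfl]
          have htop := hStack.1 rfl
          have hd : ∀ dc ∈ wfDeps s1 s2 rep ins del dd i j,
              memo.getD dc.1 0 = wfF s1 s2 rep ins del dd dc.1.1 dc.1.2 := by
            intro dc hdc
            rcases htop.2 dc hdc with h | h
            · obtain ⟨w, hw⟩ := Option.isSome_iff_exists.mp h
              rw [PySem.Dict.getD_eq_get?_getD, hw, Option.getD_some]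
              exact hMem dc.1.1 dc.1.2 w (by rwa [← Prod.mk.eta (p := dc.1)])
            · simp at h
          exact hAfterIns _ (wfExpandVal s1 s2 rep ins del dd memo i j htop.1.1 htop.1.2 hd)
        · rw [if_neg hb]
          by_cases hi : i = 0
          · rw [dif_pos hi]
            subst hi
            exact hAfterIns _ (by simp [wfF])
          · rw [dif_neg hi]
            by_cases hj : j = 0
            · rw [dif_pos hj]
              subst hj
              obtain ⟨i', rfl⟩ : ∃ i', i = i' + 1 := ⟨i - 1, by omega⟩
              exact hAfterIns _ (by simp [wfF])
            · rw [dif_neg hj]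
              -- push case
              have hb0 : b = false := by cases b
                                         · rfl
                                         · exact absurd rfl hb
              subst hb0
              have hMp : wfM (((wfDeps s1 s2 rep ins del dd i j).map
                  (fun dc => (dc.1.1, dc.1.2, false))).reverse ++ (i, j, true) :: rest) ≤ N := by
                have := wfM_push s1 s2 rep ins del dd i j hi hj rest
                simp only [wfM, List.map, List.sum_cons] at hM this ⊢
                omega
              have hSt : wfStackOK s1 s2 rep ins del dd memo []
                  (((wfDeps s1 s2 rep ins del dd i j).map
                    (fun dc => (dc.1.1, dc.1.2, false))).reverse ++ (i, j, true) :: rest) := by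
                refine wfStackOK_append_false s1 s2 rep ins del dd memo _ _ _ ?_ ?_
                · intro e he
                  simp only [List.mem_reverse, List.mem_map] at he
                  obtain ⟨dc, _, rfl⟩ := he
                  rfl
                · refine ⟨fun _ => ⟨⟨by omega, by omega⟩, fun dc hdc => Or.inr ?_⟩, ?_⟩
                  · simp only [List.append_nil, List.map_reverse, List.map_map, List.mem_reverse,
                      List.mem_map]
                    exact ⟨dc, hdc, rfl⟩
                  · refine wfStackOK_mono s1 s2 rep ins del dd memo rest _ _ ?_ hStack.2
                    intro q hq
                    rcases List.mem_cons.mp hq with hq | hq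
                    · exact hq ▸ List.mem_cons_self
                    · simp at hq
              obtain ⟨r1, r2, r3⟩ := ih _ memo hMp hMem hSt
              refine ⟨r1, fun e he => ?_, r3⟩
              rcases List.mem_cons.mp he with he | he
              · subst he
                exact r2 (i, j, true) (by simp)
              · exact r2 e (by simp [he])

theorem wfB_eq (string1 string2 : String) (rC iC dC ddC : Int) :
    wagnerFischerDistance_alt string1 string2 rC iC dC ddC =
      wfF string1.toList string2.toList (if rC > dC + iC then dC + iC else rC) iC dC ddC
        string1.toList.length string2.toList.length := by
  simp only [wagnerFischerDistance_alt]
  generalize string1.toList = s1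
  generalize string2.toList = s2
  generalize (if rC > dC + iC then dC + iC else rC) = rep
  obtain ⟨r1, r2, _⟩ := wfLoop_sound s1 s2 rep iC dC ddC
    (wfM [(s1.length, s2.length, false)]) [(s1.length, s2.length, false)] PySem.Dict.empty
    le_rfl
    (fun i j v hv => by rw [PySem.Dict.get?_empty] at hv; cases hv)
    ⟨fun h => by simp at h, trivial⟩
  have hs := r2 (s1.length, s2.length, false) List.mem_cons_self
  obtain ⟨w, hw⟩ := Option.isSome_iff_exists.mp hs
  rw [PySem.Dict.getD_eq_get?_getD, hw, Option.getD_some]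
  exact r1 s1.length s2.length w hw

-- ===== VERDICT (by name: the statement is the Claim_ definition above) =====
theorem wagnerFischerDistance_spec : Claim_equal_wagnerFischerDistance := by
  intro string1 string2 rC iC dC ddC _
  unfold Spec_wagnerFischerDistance
  rw [wfA_eq, wfB_eq]
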